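-- pv_equiv track=rewrite | github.com/LukasNeugebauer/aoc2021 | day2.py | get_position
-- ===== SOURCE A (Python) =====
-- def get_position(strs, ints):
--     x, y = 0, 0
--     for s, i in zip(strs, ints):
--         if s == "forward":
--             x += i
--         elif s == "down":
--             y += i
--         elif s == "up":
--             y -= i
--         else:
--             raise ValueError("No known direction: " + s)
--     return x, y
-- ===== SOURCE B (Python) =====
-- def get_position(strs, ints):
--     pairs = list(zip(strs, ints))
--     for s, _ in pairs:
--         if s not in ("forward", "down", "up"):
--             raise ValueError("No known direction: " + s)
--     x = sum(i for s, i in pairs if s == "forward")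
--     y = sum(i for s, i in pairs if s == "down") - sum(i for s, i in pairs if s == "up")
--     return x, y
-- ===== Notes on version B (the rewrite author's own statement) =====
-- stated objective: alternative
-- what changed: Replaces the single interleaved mutating loop with a validation pass followed by three independent filtered-sum aggregations over the zipped pairs (x from 'forward' sums, y from 'down' minus 'up' sums).
-- outside the precondition, e.g. on get_position(['forward', 'sideways'], [1, 2]): A raises ValueError, B raises ValueError
import Mathlib
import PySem

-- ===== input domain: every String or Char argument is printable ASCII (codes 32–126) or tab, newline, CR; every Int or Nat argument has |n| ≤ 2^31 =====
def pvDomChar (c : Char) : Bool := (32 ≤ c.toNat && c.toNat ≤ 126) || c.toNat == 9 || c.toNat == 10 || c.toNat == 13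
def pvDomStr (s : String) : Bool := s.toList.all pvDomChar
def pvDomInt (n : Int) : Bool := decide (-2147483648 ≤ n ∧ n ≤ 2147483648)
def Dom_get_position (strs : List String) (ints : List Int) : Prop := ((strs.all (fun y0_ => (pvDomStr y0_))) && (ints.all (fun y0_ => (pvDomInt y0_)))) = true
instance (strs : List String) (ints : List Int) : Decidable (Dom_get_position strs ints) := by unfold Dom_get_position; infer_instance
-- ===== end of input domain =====

-- B validates directions first, then computes x and y as separate filtered sums instead of one interleaved mutating loop (alternative decomposition, same cost).


-- ===== PORT A =====
-- loop over zip(strs, ints) mutating (x, y); the else branch raises ValueError in Python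
-- (those inputs are excluded by Pre_; the port returns the accumulator there).
def pvGoA : List (String × Int) → Int × Int → Int × Int
  | [], acc => acc
  | (s, i) :: rest, (x, y) =>
    if s == "forward" then pvGoA rest (x + i, y)
    else if s == "down" then pvGoA rest (x, y + i)
    else if s == "up" then pvGoA rest (x, y - i)
    else (x, y)  -- Python: raise ValueError("No known direction: " + s)

def get_position (strs : List String) (ints : List Int) : Int × Int :=
  pvGoA (strs.zip ints) (0, 0)

-- ===== PORT B =====
-- validation pass, then three independent filtered sums; the raise is outside Pre_.
def pvValid (pairs : List (String × Int)) : Bool :=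
  pairs.all (fun p => p.1 == "forward" || p.1 == "down" || p.1 == "up")

def pvSumWhere (pairs : List (String × Int)) (d : String) : Int :=
  ((pairs.filter (fun p => p.1 == d)).map Prod.snd).sum

def get_position_alt (strs : List String) (ints : List Int) : Int × Int :=
  let pairs := strs.zip ints
  if pvValid pairs then
    (pvSumWhere pairs "forward", pvSumWhere pairs "down" - pvSumWhere pairs "up")
  else (0, 0)  -- Python: raise ValueError on the first unknown direction

-- ===== PRECONDITION & SPEC =====
-- Pre_ excludes exactly the inputs on which A (and B alike) raises ValueError:
-- some zipped pair carries a direction other than "forward"/"down"/"up".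
def Pre_get_position (strs : List String) (ints : List Int) : Prop :=
  ∀ p ∈ strs.zip ints, p.1 = "forward" ∨ p.1 = "down" ∨ p.1 = "up"
instance (strs : List String) (ints : List Int) : Decidable (Pre_get_position strs ints) := by unfold Pre_get_position; infer_instance

def pvWitness_get_position : List String × List Int := (["forward", "down", "up", "forward"], [3, 2, 1, 4])

def Spec_get_position (strs : List String) (ints : List Int) (out : Int × Int) : Prop := out = get_position_alt strs ints
instance (strs : List String) (ints : List Int) (out : Int × Int) : Decidable (Spec_get_position strs ints out) := by unfold Spec_get_position; infer_instance

-- ===== CLAIM (what is proved, stated in full; the proofs are below) =====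
def Claim_equal_get_position : Prop := ∀ (strs : List String) (ints : List Int), Dom_get_position strs ints → Pre_get_position strs ints → Spec_get_position strs ints (get_position strs ints)

-- ===== LEMMAS AND PROOFS =====
theorem pvGoA_eq_sums (l : List (String × Int)) :
    ∀ x y : Int, (∀ p ∈ l, p.1 = "forward" ∨ p.1 = "down" ∨ p.1 = "up") →
      pvGoA l (x, y) = (x + pvSumWhere l "forward", y + pvSumWhere l "down" - pvSumWhere l "up") := by
  induction l with
  | nil => intro x y _; simp [pvGoA, pvSumWhere]
  | cons hd tl ih =>
    intro x y h
    obtain ⟨s, i⟩ := hd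
    have hs := h (s, i) (List.mem_cons_self ..)
    have htl : ∀ p ∈ tl, p.1 = "forward" ∨ p.1 = "down" ∨ p.1 = "up" :=
      fun p hp => h p (List.mem_cons_of_mem _ hp)
    rcases hs with hs | hs | hs <;>
      (replace hs : s = _ := hs; subst hs;
       simp [pvGoA, pvSumWhere, ih _ _ htl, Prod.ext_iff]; ring)

-- ===== VERDICT (by name: the statement is the Claim_ definition above) =====
theorem get_position_spec : Claim_equal_get_position := by
  intro strs ints _ hpre
  unfold Spec_get_position get_position get_position_alt
  have hvalid : pvValid (strs.zip ints) = true := by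
    unfold pvValid
    rw [List.all_eq_true]
    intro p hp
    rcases hpre p hp with h | h | h <;> simp [h]
  rw [pvGoA_eq_sums _ 0 0 hpre]
  simp [hvalid]
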